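-- pv_equiv track=rewrite | github.com/44REAM/ECG-holter | ecgholter/utils/utils.py | connect_segment
-- ===== SOURCE A (Python) =====
-- from typing import List, Tuple
--
-- def connect_segment(question_segments: List[Tuple[int, int]],
--         num_used_signal_for_interpolated: int) -> List[Tuple[int, int]]:
--
--     """
--     Connect questionmark segment if spacing is
--     nearer than 'num_used_signal_for_interpolated'
--
--     Args:
--         question_segments (List[Tuple[int, int]]): list of questionmark segment
--         num_used_signal_for_interpolated (int):
--
--     Returns:
--         List[Tuple(start, end)]: new list of questionmark segment
--     """
--     n_segment = len(question_segments)
--     new_question_segments = []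
--
--     idx = 0
--
--     while idx < n_segment:
--         if idx == n_segment-1:
--             new_question_segments.append(question_segments[idx])
--             break
--         next_idx = idx+1
--
--         endpoint = question_segments[idx][1]
--         while endpoint + num_used_signal_for_interpolated >= question_segments[next_idx][0]:
--             endpoint = question_segments[next_idx][1]
--             next_idx +=1
--             if next_idx>=n_segment:
--                 break
--
--         new_question_segments.append(( question_segments[idx][0], question_segments[next_idx-1][1]))
--
--         idx = next_idx
--
--     return  new_question_segments
-- ===== SOURCE B (Python) =====
-- from typing import List, Tuple
--
-- def connect_segment(question_segments: List[Tuple[int, int]],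
--         num_used_signal_for_interpolated: int) -> List[Tuple[int, int]]:
--     """Single flat pass keeping the currently open group; flush it on a gap."""
--     result = []
--     cur = None
--     for s, e in question_segments:
--         if cur is None:
--             cur = (s, e)
--         elif cur[1] + num_used_signal_for_interpolated >= s:
--             cur = (cur[0], e)
--         else:
--             result.append(cur)
--             cur = (s, e)
--     if cur is not None:
--         result.append(cur)
--     return result
-- ===== Notes on version B (the rewrite author's own statement) =====
-- stated objective: simpler
-- what changed: Replaced the nested index-advancing while loops with a single flat pass that keeps the currently open group (cur_start, cur_end) and flushes it to the result on a gap.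
import Mathlib
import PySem

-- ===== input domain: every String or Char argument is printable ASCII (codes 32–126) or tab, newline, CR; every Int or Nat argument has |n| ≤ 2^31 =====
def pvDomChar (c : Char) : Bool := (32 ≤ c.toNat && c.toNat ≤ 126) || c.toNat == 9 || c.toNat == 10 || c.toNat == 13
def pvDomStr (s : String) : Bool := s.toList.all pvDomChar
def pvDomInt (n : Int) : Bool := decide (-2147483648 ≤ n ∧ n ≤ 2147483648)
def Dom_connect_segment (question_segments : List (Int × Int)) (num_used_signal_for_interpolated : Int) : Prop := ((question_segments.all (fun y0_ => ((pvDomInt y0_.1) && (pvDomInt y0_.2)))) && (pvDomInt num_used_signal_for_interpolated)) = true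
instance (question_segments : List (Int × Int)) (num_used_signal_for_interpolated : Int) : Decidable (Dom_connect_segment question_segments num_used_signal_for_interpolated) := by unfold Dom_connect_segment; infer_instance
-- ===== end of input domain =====

-- B rewrites A's nested while loops as one flat pass with an open-group accumulator (objective: simpler).

-- ===== PORT A =====
-- Inner while loop of A: advances next_idx while the gap condition holds; returns the final next_idx.
-- All list accesses in A are in range when they are evaluated (next_idx < n at every condition
-- evaluation), so `getD` is exact here.
def innerA (qs : List (Int × Int)) (th : Int) (n : Nat) (endpoint : Int) (next_idx : Nat) : Nat :=
  if endpoint + th ≥ (qs.getD next_idx (0, 0)).1 then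
    if _h : next_idx + 1 ≥ n then next_idx + 1
    else innerA qs th n ((qs.getD next_idx (0, 0)).2) (next_idx + 1)
  else next_idx
termination_by n - next_idx
decreasing_by omega

-- needed for outerA's termination
theorem innerA_ge (qs : List (Int × Int)) (th : Int) (n : Nat) (endpoint : Int) (next_idx : Nat) :
    next_idx ≤ innerA qs th n endpoint next_idx := by
  induction hk : n - next_idx using Nat.strong_induction_on generalizing endpoint next_idx with
  | _ k ih =>
    unfold innerA
    by_cases hc : endpoint + th ≥ (qs.getD next_idx (0, 0)).1
    · rw [if_pos hc]
      by_cases he : next_idx + 1 ≥ n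
      · rw [dif_pos he]; omega
      · rw [dif_neg he]
        have := ih (n - (next_idx + 1)) (by omega) ((qs.getD next_idx (0, 0)).2) (next_idx + 1) rfl
        omega
    · rw [if_neg hc]

-- Outer while loop of A.
def outerA (qs : List (Int × Int)) (th : Int) (idx : Nat) : List (Int × Int) :=
  if _h : idx < qs.length then
    if idx == qs.length - 1 then [qs.getD idx (0, 0)]
    else
      let next := innerA qs th qs.length ((qs.getD idx (0, 0)).2) (idx + 1)
      ((qs.getD idx (0, 0)).1, (qs.getD (next - 1) (0, 0)).2) :: outerA qs th next
  else []
termination_by qs.length - idx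
decreasing_by
  have := innerA_ge qs th qs.length ((qs.getD idx (0, 0)).2) (idx + 1)
  omega

def connect_segment (question_segments : List (Int × Int)) (num_used_signal_for_interpolated : Int) : List (Int × Int) :=
  outerA question_segments num_used_signal_for_interpolated 0

-- ===== PORT B =====
def stepB (th : Int) (acc : List (Int × Int) × Option (Int × Int)) (se : Int × Int) :
    List (Int × Int) × Option (Int × Int) :=
  match acc.2 with
  | none => (acc.1, some se)
  | some (cs, ce) =>
    if ce + th ≥ se.1 then (acc.1, some (cs, se.2))
    else (acc.1 ++ [(cs, ce)], some se)

def connect_segment_alt (question_segments : List (Int × Int)) (num_used_signal_for_interpolated : Int) : List (Int × Int) :=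
  let fin := question_segments.foldl (stepB num_used_signal_for_interpolated) ([], none)
  match fin.2 with
  | none => fin.1
  | some c => fin.1 ++ [c]

-- ===== PRECONDITION & SPEC =====
def Spec_connect_segment (question_segments : List (Int × Int)) (num_used_signal_for_interpolated : Int) (out : List (Int × Int)) : Prop := out = connect_segment_alt question_segments num_used_signal_for_interpolated
instance (question_segments : List (Int × Int)) (num_used_signal_for_interpolated : Int) (out : List (Int × Int)) : Decidable (Spec_connect_segment question_segments num_used_signal_for_interpolated out) := by unfold Spec_connect_segment; infer_instance

-- ===== CLAIM (what is proved, stated in full; the proofs are below) =====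
def Claim_equal_connect_segment : Prop := ∀ (question_segments : List (Int × Int)) (num_used_signal_for_interpolated : Int), Dom_connect_segment question_segments num_used_signal_for_interpolated → Spec_connect_segment question_segments num_used_signal_for_interpolated (connect_segment question_segments num_used_signal_for_interpolated)

-- ===== LEMMAS AND PROOFS =====

-- Canonical recursive merge both ports are shown equal to.
def mergeM (th : Int) (cur : Int × Int) : List (Int × Int) → List (Int × Int)
  | [] => [cur]
  | (s, e) :: rest =>
    if cur.2 + th ≥ s then mergeM th (cur.1, e) rest
    else cur :: mergeM th (s, e) rest

theorem mergeM_nil (th : Int) (cur : Int × Int) : mergeM th cur [] = [cur] := rfl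

theorem mergeM_cons_pos (th cs ce s e : Int) (rest : List (Int × Int)) (h : ce + th ≥ s) :
    mergeM th (cs, ce) ((s, e) :: rest) = mergeM th (cs, e) rest := by
  simp [mergeM, h]

theorem mergeM_cons_neg (th cs ce s e : Int) (rest : List (Int × Int)) (h : ¬ ce + th ≥ s) :
    mergeM th (cs, ce) ((s, e) :: rest) = (cs, ce) :: mergeM th (s, e) rest := by
  simp [mergeM, h]

theorem innerA_neg (qs : List (Int × Int)) (th : Int) (n : Nat) (endpoint : Int) (next_idx : Nat)
    (hc : ¬ endpoint + th ≥ (qs.getD next_idx (0, 0)).1) :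
    innerA qs th n endpoint next_idx = next_idx := by
  unfold innerA; rw [if_neg hc]

theorem innerA_pos_stop (qs : List (Int × Int)) (th : Int) (n : Nat) (endpoint : Int) (next_idx : Nat)
    (hc : endpoint + th ≥ (qs.getD next_idx (0, 0)).1) (he : next_idx + 1 ≥ n) :
    innerA qs th n endpoint next_idx = next_idx + 1 := by
  unfold innerA; rw [if_pos hc, dif_pos he]

theorem innerA_pos_go (qs : List (Int × Int)) (th : Int) (n : Nat) (endpoint : Int) (next_idx : Nat)
    (hc : endpoint + th ≥ (qs.getD next_idx (0, 0)).1) (he : ¬ next_idx + 1 ≥ n) :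
    innerA qs th n endpoint next_idx = innerA qs th n ((qs.getD next_idx (0, 0)).2) (next_idx + 1) := by
  conv_lhs => rw [innerA]
  rw [if_pos hc, dif_neg he]

theorem foldB_merge (th : Int) (l : List (Int × Int)) :
    ∀ (res : List (Int × Int)) (cs ce : Int),
      (match (l.foldl (stepB th) (res, some (cs, ce))).2 with
       | none => (l.foldl (stepB th) (res, some (cs, ce))).1
       | some c => (l.foldl (stepB th) (res, some (cs, ce))).1 ++ [c])
      = res ++ mergeM th (cs, ce) l := by
  induction l with
  | nil => intro res cs ce; simp [mergeM]
  | cons hd tl ih =>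
    intro res cs ce
    obtain ⟨s, e⟩ := hd
    by_cases h : ce + th ≥ s
    · rw [mergeM_cons_pos th cs ce s e tl h]
      simpa [List.foldl, stepB, h] using ih res cs e
    · rw [mergeM_cons_neg th cs ce s e tl h]
      simp only [List.foldl, stepB, if_neg h]
      rw [ih (res ++ [(cs, ce)]) s e]
      simp

theorem innerA_merge (qs : List (Int × Int)) (th : Int) (cs : Int) :
    ∀ next_idx : Nat, next_idx < qs.length → 1 ≤ next_idx →
      mergeM th (cs, (qs.getD (next_idx - 1) (0, 0)).2) (qs.drop next_idx)
      = (if innerA qs th qs.length ((qs.getD (next_idx - 1) (0, 0)).2) next_idx < qs.length then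
           (cs, (qs.getD (innerA qs th qs.length ((qs.getD (next_idx - 1) (0, 0)).2) next_idx - 1) (0, 0)).2)
             :: mergeM th (qs.getD (innerA qs th qs.length ((qs.getD (next_idx - 1) (0, 0)).2) next_idx) (0, 0))
                  (qs.drop (innerA qs th qs.length ((qs.getD (next_idx - 1) (0, 0)).2) next_idx + 1))
         else [(cs, (qs.getD (innerA qs th qs.length ((qs.getD (next_idx - 1) (0, 0)).2) next_idx - 1) (0, 0)).2)]) := by
  intro next_idx
  induction hn : qs.length - next_idx using Nat.strong_induction_on generalizing next_idx with
  | _ k ih =>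
    intro hlt h1
    have hdrop : qs.drop next_idx = qs.getD next_idx (0, 0) :: qs.drop (next_idx + 1) := by
      rw [List.getD_eq_getElem qs (0,0) hlt]
      exact (List.drop_eq_getElem_cons hlt)
    rcases hP : qs.getD next_idx (0, 0) with ⟨s, e⟩
    set ep := (qs.getD (next_idx - 1) (0, 0)).2 with hep
    by_cases hc : ep + th ≥ (qs.getD next_idx (0, 0)).1
    · -- inner loop body fires
      have hc2 : ep + th ≥ s := by rw [hP] at hc; exact hc
      rw [hdrop, hP, mergeM_cons_pos th cs ep s e _ hc2]
      by_cases hend : next_idx + 1 ≥ qs.length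
      · rw [innerA_pos_stop qs th qs.length ep next_idx hc hend]
        have hd2 : qs.drop (next_idx + 1) = [] := List.drop_eq_nil_of_le hend
        rw [hd2, mergeM_nil]
        simp only [Nat.add_sub_cancel]
        have : ¬ next_idx + 1 < qs.length := by omega
        rw [if_neg this, hP]
      · rw [innerA_pos_go qs th qs.length ep next_idx hc hend]
        have hrec := ih (qs.length - (next_idx + 1)) (by omega) (next_idx + 1)
          rfl (by omega) (by omega)
        simp only [hP, Nat.add_sub_cancel] at hrec ⊢
        exact hrec
    · -- inner loop exits immediately
      have hc2 : ¬ ep + th ≥ s := by rw [hP] at hc; exact hc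
      rw [hdrop, hP, mergeM_cons_neg th cs ep s e _ hc2]
      rw [innerA_neg qs th qs.length ep next_idx hc]
      rw [if_pos hlt, hP]

theorem outerA_merge (qs : List (Int × Int)) (th : Int) :
    ∀ idx : Nat, idx < qs.length →
      outerA qs th idx = mergeM th (qs.getD idx (0, 0)) (qs.drop (idx + 1)) := by
  intro idx
  induction hn : qs.length - idx using Nat.strong_induction_on generalizing idx with
  | _ k ih =>
    intro hlt
    unfold outerA
    rw [dif_pos hlt]
    by_cases hlast : idx = qs.length - 1
    · have hd : qs.drop (idx + 1) = [] := List.drop_eq_nil_of_le (by omega)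
      have hb : (idx == qs.length - 1) = true := by simp [hlast]
      rw [hb, if_pos rfl, hd, mergeM_nil]
    · have hb : (idx == qs.length - 1) = false := by simp [hlast]
      rw [hb]
      simp only [Bool.false_eq_true, if_false]
      set next := innerA qs th qs.length ((qs.getD idx (0, 0)).2) (idx + 1) with hnext
      have hge : idx + 1 ≤ next := innerA_ge qs th qs.length _ (idx + 1)
      have hi := innerA_merge qs th (qs.getD idx (0, 0)).1 (idx + 1) (by omega) (by omega)
      simp only [Nat.add_sub_cancel, ← hnext] at hi
      by_cases hjn : next < qs.length
      · rw [ih (qs.length - next) (by omega) next rfl hjn]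
        rw [hi, if_pos hjn]
      · have hempty : outerA qs th next = [] := by unfold outerA; rw [dif_neg hjn]
        rw [hempty, hi, if_neg hjn]

theorem ports_agree (qs : List (Int × Int)) (th : Int) :
    connect_segment qs th = connect_segment_alt qs th := by
  cases qs with
  | nil => simp [connect_segment, connect_segment_alt, outerA]
  | cons hd tl =>
    obtain ⟨s, e⟩ := hd
    have ha := outerA_merge ((s, e) :: tl) th 0 (by simp)
    have hb := foldB_merge th tl [] s e
    simp only [List.getD_cons_zero, List.drop_succ_cons, List.drop_zero] at ha
    simp only [List.nil_append] at hb
    unfold connect_segment connect_segment_alt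
    simp only [List.foldl_cons, stepB]
    exact ha.trans hb.symm

-- ===== VERDICT (by name: the statement is the Claim_ definition above) =====
theorem connect_segment_spec : Claim_equal_connect_segment := by
  intro qs th _
  unfold Spec_connect_segment
  exact ports_agree qs th
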